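-- pv_equiv track=rewrite | github.com/jfmonsa/DSA_FADA | problems/divide_and_conquer/max_elm.py | min_elm_aux
-- ===== SOURCE A (Python) =====
-- def min_elm_aux(i, j, arr):
--     # conquer
--     # This prevents the division into thirds when there are not enough elements.
--     if i == j:
--         return arr[i]
--     elif j - i == 1:
--         return min(arr[i], arr[j])
--     # divide
--     third = (j - i + 1) // 3
--     q1 = i + third - 1
--     q2 = j - third + 1
--
--     # combine
--     return min(
--         min_elm_aux(i, q1, arr),
--         min_elm_aux(q1 + 1, q2 - 1, arr),
--         min_elm_aux(q2, j, arr),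
--     )
-- ===== SOURCE B (Python) =====
-- def min_elm_aux(i, j, arr):
--     # single left-to-right scan over arr[i..j] instead of ternary divide-and-conquer
--     m = arr[i]
--     for k in range(i + 1, j + 1):
--         m = min(m, arr[k])
--     return m
-- ===== Notes on version B (the rewrite author's own statement) =====
-- stated objective: simpler
-- what changed: Replaced the ternary divide-and-conquer recursion with a single linear scan seeded at arr[i] that folds min over indices i+1..j.
import Mathlib
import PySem

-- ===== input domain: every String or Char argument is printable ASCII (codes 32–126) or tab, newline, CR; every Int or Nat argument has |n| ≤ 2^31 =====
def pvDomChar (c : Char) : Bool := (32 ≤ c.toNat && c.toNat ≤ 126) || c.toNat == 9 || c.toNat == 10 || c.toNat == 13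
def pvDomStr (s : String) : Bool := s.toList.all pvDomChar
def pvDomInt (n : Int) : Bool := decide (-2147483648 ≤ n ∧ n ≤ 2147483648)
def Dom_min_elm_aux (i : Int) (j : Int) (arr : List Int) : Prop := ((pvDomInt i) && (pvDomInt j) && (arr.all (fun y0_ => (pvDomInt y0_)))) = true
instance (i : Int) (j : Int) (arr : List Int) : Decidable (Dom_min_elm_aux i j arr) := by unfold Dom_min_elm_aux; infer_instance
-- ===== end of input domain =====

-- B replaces A's ternary divide-and-conquer with a single left-to-right fold of min over arr[i..j]; simpler, same O(n) cost.


-- ===== PORT A =====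
-- fuel makes the recursion total in Lean; within Pre_ every recursive call shrinks j - i, so the initial fuel (j-i).toNat + 1 is never exhausted
def minElmAuxFuel (fuel : Nat) (i : Int) (j : Int) (arr : List Int) : Int :=
  match fuel with
  | 0 => 0
  | fuel + 1 =>
    if i == j then PySem.List.pyGetD arr i 0
    else if j - i == 1 then min (PySem.List.pyGetD arr i 0) (PySem.List.pyGetD arr j 0)
    else
      let third := PySem.Int.floordiv (j - i + 1) 3
      let q1 := i + third - 1
      let q2 := j - third + 1
      min (minElmAuxFuel fuel i q1 arr)
        (min (minElmAuxFuel fuel (q1 + 1) (q2 - 1) arr) (minElmAuxFuel fuel q2 j arr))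

def min_elm_aux (i : Int) (j : Int) (arr : List Int) : Int :=
  minElmAuxFuel ((j - i).toNat + 1) i j arr

-- ===== PORT B =====
def min_elm_aux_alt (i : Int) (j : Int) (arr : List Int) : Int :=
  (PySem.List.pyRange (i + 1) (j + 1) 1).foldl
    (fun m k => min m (PySem.List.pyGetD arr k 0)) (PySem.List.pyGetD arr i 0)

-- ===== PRECONDITION & SPEC =====
-- Pre_ excludes i > j (A recurses without progress: RecursionError) and indices outside
-- Python's valid range -len ≤ k < len for some k in [i, j] (A raises IndexError).
def Pre_min_elm_aux (i : Int) (j : Int) (arr : List Int) : Prop :=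
  i ≤ j ∧ -(arr.length : Int) ≤ i ∧ j < (arr.length : Int)
instance (i : Int) (j : Int) (arr : List Int) : Decidable (Pre_min_elm_aux i j arr) := by unfold Pre_min_elm_aux; infer_instance

def pvWitness_min_elm_aux : Int × Int × List Int := (0, 2, [4, -1, 7])

def Spec_min_elm_aux (i : Int) (j : Int) (arr : List Int) (out : Int) : Prop := out = min_elm_aux_alt i j arr
instance (i : Int) (j : Int) (arr : List Int) (out : Int) : Decidable (Spec_min_elm_aux i j arr out) := by unfold Spec_min_elm_aux; infer_instance

-- ===== CLAIM (what is proved, stated in full; the proofs are below) =====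
def Claim_equal_min_elm_aux : Prop := ∀ (i : Int) (j : Int) (arr : List Int), Dom_min_elm_aux i j arr → Pre_min_elm_aux i j arr → Spec_min_elm_aux i j arr (min_elm_aux i j arr)

-- ===== LEMMAS AND PROOFS =====

-- pulling a min out of the fold
lemma foldl_min_pull (arr : List Int) (l : List Int) :
    ∀ a b : Int, l.foldl (fun m k => min m (PySem.List.pyGetD arr k 0)) (min a b)
      = min a (l.foldl (fun m k => min m (PySem.List.pyGetD arr k 0)) b) := by
  induction l with
  | nil => intro a b; simp
  | cons x xs ih =>
      intro a b
      simp only [List.foldl_cons, min_assoc]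
      exact ih a _

-- B on a contiguous range splits at any interior point
lemma alt_split (arr : List Int) (i m j : Int) (h1 : i ≤ m) (h2 : m < j) :
    min_elm_aux_alt i j arr = min (min_elm_aux_alt i m arr) (min_elm_aux_alt (m + 1) j arr) := by
  unfold min_elm_aux_alt
  rw [PySem.List.pyRange_one_append (i + 1) (m + 1) (j + 1) (by omega) (by omega),
      List.foldl_append,
      PySem.List.pyRange_one_cons (by omega : (m + 1 : Int) < j + 1),
      List.foldl_cons]
  have : (m + 1 + 1 : Int) = m + 2 := by ring
  rw [foldl_min_pull]

lemma fuel_eq (arr : List Int) :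
    ∀ (fuel : Nat) (i j : Int), i ≤ j → (j - i).toNat < fuel →
      minElmAuxFuel fuel i j arr = min_elm_aux_alt i j arr := by
  intro fuel
  induction fuel with
  | zero => intro i j _ h; omega
  | succ n ih =>
      intro i j hij hf
      by_cases h1 : i = j
      · subst h1
        simp [minElmAuxFuel, min_elm_aux_alt,
          PySem.List.pyRange_one_eq_nil (by omega : (i + 1 : Int) ≤ i + 1)]
      · by_cases h2 : j - i = 1
        · have hj : j = i + 1 := by omega
          subst hj
          simp [minElmAuxFuel, min_elm_aux_alt,
            PySem.List.pyRange_one_cons (by omega : (i + 1 : Int) < i + 1 + 1),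
            PySem.List.pyRange_one_eq_nil (by omega : (i + 1 + 1 : Int) ≤ i + 1 + 1)]
        · have hge : i + 2 ≤ j := by omega
          have hfd : PySem.Int.floordiv (j - i + 1) 3 = (j - i + 1) / 3 :=
            PySem.Int.floordiv_eq_ediv_of_pos (by omega)
          simp only [minElmAuxFuel, beq_iff_eq, h1, h2, if_false, hfd]
          set t : Int := (j - i + 1) / 3 with ht
          have hb : 3 * t ≤ j - i + 1 ∧ j - i + 1 < 3 * t + 3 := by omega
          rw [ih i (i + t - 1) (by omega) (by omega),
              ih (i + t - 1 + 1) (j - t + 1 - 1) (by omega) (by omega),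
              ih (j - t + 1) j (by omega) (by omega)]
          rw [alt_split arr i (i + t - 1) j (by omega) (by omega),
              alt_split arr (i + t - 1 + 1) (j - t + 1 - 1) j (by omega) (by omega)]
          norm_num

-- ===== VERDICT (by name: the statement is the Claim_ definition above) =====
theorem min_elm_aux_spec : Claim_equal_min_elm_aux := by
  intro i j arr _ hpre
  unfold Spec_min_elm_aux min_elm_aux
  exact fuel_eq arr _ i j hpre.1 (by omega)
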